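-- pv_equiv track=rewrite | github.com/fblissjr/AdderBoard | infer.py | compute_carries
-- ===== SOURCE A (Python) =====
-- N_DIGITS = 10
--
-- def _digits_lsb(n: int) -> list[int]:
--     """Decompose n into N_DIGITS least-significant-first digits."""
--     return [(n // (10 ** i)) % 10 for i in range(N_DIGITS)]
--
-- def compute_carries(a: int, b: int) -> tuple[list[int], list[int], list[int]]:
--     """Return (carries, a_digits, b_digits). carries[i] = carry INTO position i."""
--     a_digits = _digits_lsb(a)
--     b_digits = _digits_lsb(b)
--
--     carries = [0] * (N_DIGITS + 1)
--     for i in range(N_DIGITS):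
--         total = a_digits[i] + b_digits[i] + carries[i]
--         carries[i + 1] = 1 if total >= 10 else 0
--
--     return carries, a_digits, b_digits
-- ===== SOURCE B (Python) =====
-- N_DIGITS = 10
--
-- def _digits_lsb(n: int) -> list[int]:
--     """Decompose n into N_DIGITS least-significant-first digits."""
--     return [(n // (10 ** i)) % 10 for i in range(N_DIGITS)]
--
-- def compute_carries(a: int, b: int) -> tuple[list[int], list[int], list[int]]:
--     """Return (carries, a_digits, b_digits). carries[i] = carry INTO position i."""
--     carries = [1 if (a % 10 ** i) + (b % 10 ** i) >= 10 ** i else 0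
--                for i in range(N_DIGITS + 1)]
--     return carries, _digits_lsb(a), _digits_lsb(b)
-- ===== Notes on version B (the rewrite author's own statement) =====
-- stated objective: simpler
-- what changed: Replaces the sequential carry-propagation loop over a mutated list by a single comprehension that computes each carry independently in closed form: carry i = 1 iff (a mod 10^i) + (b mod 10^i) >= 10^i.
import Mathlib
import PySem

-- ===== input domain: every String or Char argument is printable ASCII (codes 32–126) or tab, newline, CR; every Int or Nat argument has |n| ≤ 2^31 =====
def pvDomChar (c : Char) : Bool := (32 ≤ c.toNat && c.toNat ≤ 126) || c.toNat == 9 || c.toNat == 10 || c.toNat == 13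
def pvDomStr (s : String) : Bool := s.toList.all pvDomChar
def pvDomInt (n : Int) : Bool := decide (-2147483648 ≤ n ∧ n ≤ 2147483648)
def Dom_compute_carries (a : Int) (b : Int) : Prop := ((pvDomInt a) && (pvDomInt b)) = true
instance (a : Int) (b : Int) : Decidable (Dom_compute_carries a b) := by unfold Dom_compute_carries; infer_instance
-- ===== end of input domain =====

-- B replaces A's sequential carry-propagation loop by an independent closed-form
-- test per position (carry i = 1 iff (a mod 10^i) + (b mod 10^i) ≥ 10^i); objective: simpler.

-- ===== PORT A =====
-- helper shared by both Pythons: [(n // 10**i) % 10 for i in range(10)]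
def pvDigitsLsb (n : Int) : List Int :=
  (PySem.List.pyRange 0 10 1).map
    (fun i => PySem.Int.mod (PySem.Int.floordiv n ((10:Int) ^ i.toNat)) 10)

def compute_carries (a : Int) (b : Int) : List Int × List Int × List Int :=
  let a_digits := pvDigitsLsb a
  let b_digits := pvDigitsLsb b
  let carries :=
    (PySem.List.pyRange 0 10 1).foldl
      (fun cs i =>
        PySem.List.pySetD cs (i + 1)
          (if PySem.List.pyGetD a_digits i 0 + PySem.List.pyGetD b_digits i 0
                + PySem.List.pyGetD cs i 0 ≥ 10 then (1:Int) else 0))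
      (List.replicate 11 0)
  (carries, a_digits, b_digits)

-- ===== PORT B =====
def compute_carries_alt (a : Int) (b : Int) : List Int × List Int × List Int :=
  let carries :=
    (PySem.List.pyRange 0 11 1).map
      (fun i => if PySem.Int.mod a ((10:Int) ^ i.toNat) + PySem.Int.mod b ((10:Int) ^ i.toNat)
                    ≥ (10:Int) ^ i.toNat then (1:Int) else 0)
  (carries, pvDigitsLsb a, pvDigitsLsb b)

-- ===== PRECONDITION & SPEC =====
def Spec_compute_carries (a : Int) (b : Int) (out : List Int × List Int × List Int) : Prop := out = compute_carries_alt a b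
instance (a : Int) (b : Int) (out : List Int × List Int × List Int) : Decidable (Spec_compute_carries a b out) := by unfold Spec_compute_carries; infer_instance

-- ===== CLAIM (what is proved, stated in full; the proofs are below) =====
def Claim_equal_compute_carries : Prop := ∀ (a : Int) (b : Int), Dom_compute_carries a b → Spec_compute_carries a b (compute_carries a b)

-- ===== LEMMAS AND PROOFS =====

-- digit i of |a| in A's sense, and the two carry characterisations
def pvDig (a : Int) (n : Nat) : Int := (a / 10 ^ n) % 10

def pvCA (a b : Int) : Nat → Int
  | 0 => 0
  | n + 1 => if pvDig a n + pvDig b n + pvCA a b n ≥ 10 then 1 else 0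

def pvCB (a b : Int) (n : Nat) : Int :=
  if (10:Int) ^ n ≤ a % 10 ^ n + b % 10 ^ n then 1 else 0

theorem pvModSplit (a p : Int) (hp : 0 < p) : a % (p * 10) = p * ((a / p) % 10) + a % p := by
  have h := Int.ediv_ediv_of_nonneg (x := a) (z := 10) hp.le
  rw [Int.emod_def, Int.emod_def, Int.emod_def, ← h]; ring

theorem pvCarryStep (a b : Int) (n : Nat) :
    pvCB a b (n + 1)
      = (if (10:Int) ≤ pvDig a n + pvDig b n + pvCB a b n then 1 else 0) := by
  unfold pvCB pvDig
  have hppos : (0:Int) < 10 ^ n := by positivity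
  have h1 : (10:Int) ^ (n + 1) = 10 ^ n * 10 := by ring
  rw [h1, pvModSplit a _ hppos, pvModSplit b _ hppos]
  have ha1 : 0 ≤ a % 10 ^ n := Int.emod_nonneg a hppos.ne'
  have ha2 : a % 10 ^ n < 10 ^ n := Int.emod_lt_of_pos a hppos
  have hb1 : 0 ≤ b % 10 ^ n := Int.emod_nonneg b hppos.ne'
  have hb2 : b % 10 ^ n < 10 ^ n := Int.emod_lt_of_pos b hppos
  have hda1 : 0 ≤ (a / 10 ^ n) % 10 := Int.emod_nonneg _ (by norm_num)
  have hda2 : (a / 10 ^ n) % 10 < 10 := Int.emod_lt_of_pos _ (by norm_num)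
  have hdb1 : 0 ≤ (b / 10 ^ n) % 10 := Int.emod_nonneg _ (by norm_num)
  have hdb2 : (b / 10 ^ n) % 10 < 10 := Int.emod_lt_of_pos _ (by norm_num)
  by_cases hc : (10:Int) ^ n ≤ a % 10 ^ n + b % 10 ^ n
  · have hi : (if (10:Int) ^ n ≤ a % 10 ^ n + b % 10 ^ n then (1:Int) else 0) = 1 := if_pos hc
    rw [hi]
    split_ifs with h2 h3
    · rfl
    · exfalso; apply h3; by_contra h; push Not at h
      have h9 : (a / 10 ^ n) % 10 + (b / 10 ^ n) % 10 ≤ 8 := by omega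
      nlinarith [mul_le_mul_of_nonneg_left h9 hppos.le]
    · exfalso; apply h2
      have h9 : (9:Int) ≤ (a / 10 ^ n) % 10 + (b / 10 ^ n) % 10 := by omega
      nlinarith [mul_le_mul_of_nonneg_left h9 hppos.le]
    · rfl
  · have hi : (if (10:Int) ^ n ≤ a % 10 ^ n + b % 10 ^ n then (1:Int) else 0) = 0 := if_neg hc
    rw [hi]
    push Not at hc
    split_ifs with h2 h3
    · rfl
    · exfalso; apply h3; by_contra h; push Not at h
      have h9 : (a / 10 ^ n) % 10 + (b / 10 ^ n) % 10 ≤ 9 := by omega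
      nlinarith [mul_le_mul_of_nonneg_left h9 hppos.le]
    · exfalso; apply h2
      have h9 : (10:Int) ≤ (a / 10 ^ n) % 10 + (b / 10 ^ n) % 10 := by omega
      nlinarith [mul_le_mul_of_nonneg_left h9 hppos.le]
    · rfl

theorem pvCA_eq_pvCB (a b : Int) (n : Nat) : pvCA a b n = pvCB a b n := by
  induction n with
  | zero =>
    simp [pvCA, pvCB]
  | succ n ih =>
    rw [pvCarryStep a b n]
    simp only [pvCA, ih, ge_iff_le]

-- reading the digit lists inside A's loop
theorem pvDigitsLsb_getD (a : Int) (k : Nat) (hk : k < 10) :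
    PySem.List.pyGetD (pvDigitsLsb a) (k : Int) 0 = pvDig a k := by
  unfold pvDigitsLsb
  rw [show PySem.List.pyRange 0 10 1 = PySem.List.pyRange 0 ((10:Nat):Int) 1 by norm_num,
      PySem.List.pyGetD_map_pyRange _ 10 k _ hk]
  have hp : (0:Int) < 10 ^ k := by positivity
  rw [Int.toNat_natCast, PySem.Int.floordiv_eq_ediv_of_pos hp,
      PySem.Int.mod_eq_emod_of_pos (by norm_num)]
  rfl

theorem pv_if_self (a b : Int) (k : Nat) :
    (if 1 ≤ k ∧ k ≤ k then pvCA a b k else 0) = pvCA a b k := by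
  cases k with
  | zero => simp [pvCA]
  | succ k => rw [if_pos (by omega)]

-- A's loop invariant: after the first k iterations the carries list holds pvCA at 1..k
theorem pvFoldInv (a b : Int) (k : Nat) (hk : k ≤ 10) :
    (PySem.List.pyRange 0 (k : Int) 1).foldl
      (fun cs i =>
        PySem.List.pySetD cs (i + 1)
          (if PySem.List.pyGetD (pvDigitsLsb a) i 0 + PySem.List.pyGetD (pvDigitsLsb b) i 0
                + PySem.List.pyGetD cs i 0 ≥ 10 then (1:Int) else 0))
      (List.replicate 11 0)
    = (List.range 11).map (fun j => if 1 ≤ j ∧ j ≤ k then pvCA a b j else 0) := by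
  induction k with
  | zero =>
    rw [show ((0:Nat):Int) = 0 by norm_num]
    rw [show (fun j => if 1 ≤ j ∧ j ≤ 0 then pvCA a b j else 0) = (fun _ => (0:Int)) from
      funext fun j => if_neg (by omega)]
    simp [PySem.List.pyRange, List.map_const']
  | succ k ih =>
    have hk10 : k < 10 := hk
    rw [show ((k + 1 : Nat):Int) = (k : Int) + 1 by push_cast; ring,
        PySem.List.pyRange_one_succ_right (by positivity), List.foldl_append,
        ih (by omega)]
    simp only [List.foldl_cons, List.foldl_nil]
    rw [pvDigitsLsb_getD a k hk10, pvDigitsLsb_getD b k hk10,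
        PySem.List.pyGetD_natCast, PySem.List.getD_map_range _ 11 k _ (by omega),
        pv_if_self a b k,
        show (k : Int) + 1 = ((k + 1 : Nat):Int) by push_cast; ring,
        PySem.List.pySetD_natCast]
    have hval : (if pvDig a k + pvDig b k + pvCA a b k ≥ 10 then (1:Int) else 0)
        = pvCA a b (k + 1) := by rw [pvCA]
    rw [hval]
    apply List.ext_getElem
    · simp
    · intro j h1 h2
      simp only [List.getElem_set, List.getElem_map, List.getElem_range]
      simp only [List.length_set, List.length_map, List.length_range] at h1 h2
      by_cases hj : k + 1 = j
      · rw [if_pos hj, ← hj, if_pos (by omega)]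
      · rw [if_neg hj]
        by_cases hle : 1 ≤ j ∧ j ≤ k
        · rw [if_pos hle, if_pos (by omega)]
        · rw [if_neg hle, if_neg (by omega)]

-- B's closed-form list equals pvCB pointwise
theorem pvAltCarries (a b : Int) :
    (PySem.List.pyRange 0 11 1).map
      (fun i => if PySem.Int.mod a ((10:Int) ^ i.toNat) + PySem.Int.mod b ((10:Int) ^ i.toNat)
                    ≥ (10:Int) ^ i.toNat then (1:Int) else 0)
    = (List.range 11).map (fun j => pvCB a b j) := by
  rw [show PySem.List.pyRange 0 11 1 = PySem.List.pyRange 0 ((11:Nat):Int) 1 by norm_num,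
      PySem.List.pyRange_zero_natCast, List.map_map]
  apply List.map_congr_left
  intro j _
  simp only [Function.comp_apply, Int.toNat_natCast]
  have h1 : PySem.Int.mod a ((10:Int) ^ j) = a % 10 ^ j :=
    PySem.Int.mod_eq_emod_of_pos (by positivity)
  have h2 : PySem.Int.mod b ((10:Int) ^ j) = b % 10 ^ j :=
    PySem.Int.mod_eq_emod_of_pos (by positivity)
  simp only [h1, h2, ge_iff_le, pvCB]

-- ===== VERDICT (by name: the statement is the Claim_ definition above) =====
theorem compute_carries_spec : Claim_equal_compute_carries := by
  intro a b _
  unfold Spec_compute_carries compute_carries compute_carries_alt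
  rw [pvAltCarries a b]
  refine congrArg (fun c => (c, pvDigitsLsb a, pvDigitsLsb b)) ?_
  rw [show PySem.List.pyRange 0 10 1 = PySem.List.pyRange 0 ((10:Nat):Int) 1 by norm_num,
      pvFoldInv a b 10 (by omega)]
  apply List.map_congr_left
  intro j hj
  rw [List.mem_range] at hj
  by_cases h0 : 1 ≤ j
  · rw [if_pos ⟨h0, by omega⟩, pvCA_eq_pvCB]
  · have : j = 0 := by omega
    subst this
    rw [if_neg (by omega)]
    simp [pvCB]
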